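-- pv_equiv track=rewrite | github.com/BrettRey/erdos-problem-993 | test_candidate_extremals.py | path_EJ
-- ===== SOURCE A (Python) =====
-- def _polyadd(a, b):
--     la, lb = len(a), len(b)
--     out = [0] * max(la, lb)
--     for i in range(la):
--         out[i] += a[i]
--     for i in range(lb):
--         out[i] += b[i]
--     return out
--
-- def path_EJ(m):
--     """E and J polynomials for a path P_m rooted at one endpoint.
--
--     Path: v0 - v1 - ... - v_{m-1}, rooted at v0.
--     """
--     if m == 1:
--         return [1], [1]
--     # Build bottom-up
--     # dp[v][0] = E_v, dp[v][1] = J_v (= dp[v][1]/x for include-root)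
--     E = [1]  # leaf
--     J = [1]  # leaf
--     for _ in range(m - 1):
--         # v has one child c with (E_c, J_c) = (E, J)
--         I_c = _polyadd(E, [0] + J)
--         new_E = I_c  # E_v = product of I over children = I_c
--         new_J = E    # J_v = product of E over children = E_c
--         E, J = new_E, new_J
--     return E, J
-- ===== SOURCE B (Python) =====
-- def path_EJ(m):
--     """E and J polynomials for a path P_m rooted at one endpoint.
--
--     Closed form: E[i] = C(m-i, i), J[i] = C(m-1-i, i), computed in one
--     O(m) pass per row by an exact ratio update between consecutive binomials.
--     """
--     if m <= 1:
--         return [1], [1]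
--
--     def binom_row(n):
--         # [C(n - i, i) for i in range(n // 2 + 1)]
--         out = [1]
--         c = 1
--         for i in range(1, n // 2 + 1):
--             c = c * (n - 2 * i + 2) * (n - 2 * i + 1) // (i * (n - i + 1))
--             out.append(c)
--         return out
--
--     return binom_row(m), binom_row(m - 1)
-- ===== Notes on version B (the rewrite author's own statement) =====
-- stated objective: faster
-- what changed: Replaces A's bottom-up polynomial-Fibonacci loop (m-1 polynomial additions of growing length) by the closed form E[i]=C(m-i,i), J[i]=C(m-1-i,i), each row produced in one linear pass via an exact ratio update between consecutive binomial coefficients.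
import Mathlib
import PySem

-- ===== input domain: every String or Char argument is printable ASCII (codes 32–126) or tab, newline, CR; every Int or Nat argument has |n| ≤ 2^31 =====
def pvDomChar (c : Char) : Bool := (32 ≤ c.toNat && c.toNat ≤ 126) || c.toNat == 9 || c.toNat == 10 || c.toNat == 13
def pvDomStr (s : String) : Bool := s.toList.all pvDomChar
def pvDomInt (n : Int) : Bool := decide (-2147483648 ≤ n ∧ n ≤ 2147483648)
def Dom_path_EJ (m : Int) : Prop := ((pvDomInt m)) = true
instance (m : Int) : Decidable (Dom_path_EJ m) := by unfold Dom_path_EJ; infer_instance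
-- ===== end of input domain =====

-- B replaces A's O(m^2) polynomial-Fibonacci loop by the closed form E[i]=C(m-i,i),
-- J[i]=C(m-1-i,i), each row built in one O(m) pass by an exact ratio update.

-- ===== PORT A =====
-- _polyadd: out = [0]*max(la,lb); two index loops adding a[i] resp. b[i] into out[i].
def pvPolyadd (a b : List Int) : List Int :=
  let out : List Int := List.replicate (max a.length b.length) 0
  let out := (List.range a.length).foldl (fun o i => o.set i (o.getD i 0 + a.getD i 0)) out
  (List.range b.length).foldl (fun o i => o.set i (o.getD i 0 + b.getD i 0)) out

-- for _ in range(m-1): E, J = polyadd(E, [0]+J), E   (range(m-1) is empty for m ≤ 1)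
def path_EJ (m : Int) : List Int × List Int :=
  if m = 1 then ([1], [1])
  else
    (List.range (m - 1).toNat).foldl
      (fun (s : List Int × List Int) _ => (pvPolyadd s.1 (0 :: s.2), s.1)) ([1], [1])

-- ===== PORT B =====
-- binom_row(n): out=[1]; c=1; for i in 1..n//2: c = c*(n-2i+2)*(n-2i+1)//(i*(n-i+1)); out.append(c)
def pvBinomRow (n : Int) : List Int :=
  ((PySem.List.pyRange 1 (PySem.Int.floordiv n 2 + 1) 1).foldl
    (fun (s : List Int × Int) i =>
      let c := PySem.Int.floordiv (s.2 * (n - 2 * i + 2) * (n - 2 * i + 1)) (i * (n - i + 1))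
      (s.1 ++ [c], c)) ([1], 1)).1

def path_EJ_alt (m : Int) : List Int × List Int :=
  if m ≤ 1 then ([1], [1]) else (pvBinomRow m, pvBinomRow (m - 1))

-- ===== PRECONDITION & SPEC =====
def Spec_path_EJ (m : Int) (out : List Int × List Int) : Prop := out = path_EJ_alt m
instance (m : Int) (out : List Int × List Int) : Decidable (Spec_path_EJ m out) := by unfold Spec_path_EJ; infer_instance

-- ===== CLAIM (what is proved, stated in full; the proofs are below) =====
def Claim_equal_path_EJ : Prop := ∀ (m : Int), Dom_path_EJ m → Spec_path_EJ m (path_EJ m)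

-- ===== LEMMAS AND PROOFS =====

/-- The binomial row `[C(n-i, i) for i in range(n//2 + 1)]` both programs compute. -/
def specRow (n : Nat) : List Int := (List.range (n / 2 + 1)).map (fun i => ((n - i).choose i : Int))

lemma getD_set_int (l : List Int) (i j : Nat) (v : Int) :
    (l.set i v).getD j 0 = if i = j ∧ j < l.length then v else l.getD j 0 := by
  rw [List.getD_eq_getElem?_getD, List.getD_eq_getElem?_getD, List.getElem?_set]
  by_cases hij : i = j
  · subst hij
    by_cases hl : i < l.length
    · simp [hl]
    · simp [hl]
  · simp [hij]

lemma addLoop_length (a o : List Int) (n : Nat) :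
    ((List.range n).foldl (fun o i => o.set i (o.getD i 0 + a.getD i 0)) o).length = o.length := by
  induction n with
  | zero => simp
  | succ n ih =>
    rw [List.range_succ, List.foldl_append]
    simpa using ih

lemma addLoop_getD (a o : List Int) (n : Nat) (hn : n ≤ o.length) (j : Nat) :
    ((List.range n).foldl (fun o i => o.set i (o.getD i 0 + a.getD i 0)) o).getD j 0
      = o.getD j 0 + (if j < n then a.getD j 0 else 0) := by
  induction n with
  | zero => simp
  | succ n ih =>
    rw [List.range_succ, List.foldl_append]
    simp only [List.foldl_cons, List.foldl_nil]
    rw [getD_set_int, addLoop_length]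
    by_cases hj : n = j
    · subst hj
      rw [if_pos ⟨rfl, by omega⟩, ih (by omega)]
      simp
    · rw [if_neg (by tauto), ih (by omega)]
      by_cases hjn : j < n
      · rw [if_pos hjn, if_pos (by omega)]
      · rw [if_neg hjn, if_neg (by omega)]

lemma getD_replicate_zero (n j : Nat) : (List.replicate n (0 : Int)).getD j 0 = 0 := by
  by_cases h : j < n
  · rw [List.getD_eq_getElem _ _ (by simpa using h)]; simp
  · rw [List.getD_eq_default _ _ (by simpa using (by omega : n ≤ j))]

lemma pvPolyadd_length (a b : List Int) : (pvPolyadd a b).length = max a.length b.length := by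
  unfold pvPolyadd
  rw [addLoop_length, addLoop_length, List.length_replicate]

lemma pvPolyadd_getD (a b : List Int) (j : Nat) :
    (pvPolyadd a b).getD j 0 = a.getD j 0 + b.getD j 0 := by
  unfold pvPolyadd
  rw [addLoop_getD b _ _ (by rw [addLoop_length, List.length_replicate]; omega),
      addLoop_getD a _ _ (by rw [List.length_replicate]; omega),
      getD_replicate_zero]
  have ha : (if j < a.length then a.getD j 0 else 0) = a.getD j 0 := by
    by_cases h : j < a.length
    · simp [h]
    · rw [if_neg h, List.getD_eq_default _ _ (by omega : a.length ≤ j)]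
  have hb : (if j < b.length then b.getD j 0 else 0) = b.getD j 0 := by
    by_cases h : j < b.length
    · simp [h]
    · rw [if_neg h, List.getD_eq_default _ _ (by omega : b.length ≤ j)]
  rw [ha, hb]; ring

lemma specRow_getD (n j : Nat) :
    (specRow n).getD j 0 = if j < n / 2 + 1 then (((n - j).choose j : Nat) : Int) else 0 := by
  unfold specRow
  rw [List.getD_eq_getElem?_getD]
  by_cases h : j < n / 2 + 1
  · rw [if_pos h]
    simp [List.getElem?_map, List.getElem?_range h]
  · rw [if_neg h]
    rw [List.getElem?_eq_none (by simpa using (by omega : n / 2 + 1 ≤ j))]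
    rfl

lemma specRow_length (n : Nat) : (specRow n).length = n / 2 + 1 := by
  unfold specRow; simp

/-- one Fibonacci-polynomial step equals the next binomial row (Pascal's rule). -/
lemma specRow_step (n : Nat) (hn : 1 ≤ n) :
    pvPolyadd (specRow n) (0 :: specRow (n - 1)) = specRow (n + 1) := by
  have hlen : (pvPolyadd (specRow n) (0 :: specRow (n - 1))).length = (specRow (n + 1)).length := by
    rw [pvPolyadd_length, specRow_length, specRow_length]
    simp only [List.length_cons, specRow_length]
    omega
  apply List.ext_getElem hlen
  intro i h1 h2
  rw [← List.getD_eq_getElem _ 0 h1, ← List.getD_eq_getElem _ 0 h2, pvPolyadd_getD]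
  have hi : i < (n + 1) / 2 + 1 := by rw [specRow_length] at h2; exact h2
  rcases i with _ | j
  · -- i = 0
    rw [specRow_getD, specRow_getD, if_pos (by omega), if_pos (by omega)]
    simp
  · -- i = j + 1
    have hcons : ((0 : Int) :: specRow (n - 1)).getD (j + 1) 0 = (specRow (n - 1)).getD j 0 := by
      simp
    rw [hcons, specRow_getD, specRow_getD, specRow_getD]
    rw [if_pos (by omega : j + 1 < (n + 1) / 2 + 1)]
    by_cases hc : j + 1 < n / 2 + 1
    · rw [if_pos hc, if_pos (by omega : j < (n - 1) / 2 + 1)]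
      have e1 : n - (j + 1) = (n - 1 - j - 1) + 1 := by omega
      have e2 : n + 1 - (j + 1) = (n - 1 - j - 1) + 1 + 1 := by omega
      have e3 : n - 1 - j = (n - 1 - j - 1) + 1 := by omega
      rw [e1, e2, e3]
      push_cast [Nat.choose_succ_succ]
      ring
    · -- n odd, j + 1 = (n+1)/2 : sum is 0 + C(j, j) = 1 = C(j+1, j+1)
      rw [if_neg hc, if_pos (by omega : j < (n - 1) / 2 + 1)]
      have e1 : n - 1 - j = j := by omega
      have e2 : n + 1 - (j + 1) = j + 1 := by omega
      rw [e1, e2, Nat.choose_self, Nat.choose_self]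
      norm_num

/-- A's loop state after k iterations. -/
lemma loopA (k : Nat) :
    (List.range k).foldl
      (fun (s : List Int × List Int) _ => (pvPolyadd s.1 (0 :: s.2), s.1)) ([1], [1])
      = (specRow (k + 1), specRow k) := by
  induction k with
  | zero => decide
  | succ k ih =>
    rw [List.range_succ, List.foldl_append, ih]
    simp only [List.foldl_cons, List.foldl_nil]
    have := specRow_step (k + 1) (by omega)
    simp only [Nat.add_sub_cancel] at this
    rw [this]

lemma choose_ratio (n k : Nat) (h : 2 * (k + 1) ≤ n) :
    (n - k).choose k * (n - 2 * k) * (n - 2 * k - 1)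
      = (n - k - 1).choose (k + 1) * ((k + 1) * (n - k)) := by
  have h1 := Nat.choose_succ_right_eq (n - k) k
  have e0 : n - k - k = n - 2 * k := by omega
  rw [e0] at h1
  have h2 := Nat.choose_mul_succ_eq (n - k - 1) (k + 1)
  have e1 : n - k - 1 + 1 = n - k := by omega
  have e2 : n - k - (k + 1) = n - 2 * k - 1 := by omega
  rw [e1, e2] at h2
  set A := (n - k).choose k
  set B := (n - k).choose (k + 1)
  set D := (n - k - 1).choose (k + 1)
  set x := n - 2 * k
  set y := n - 2 * k - 1
  set z := n - k
  calc A * x * y = B * (k + 1) * y := by rw [h1]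
    _ = B * y * (k + 1) := by ring
    _ = D * z * (k + 1) := by rw [h2]
    _ = D * ((k + 1) * z) := by ring

/-- B's loop state after the iterations i = 1 .. k. -/
lemma binomRow_loop (n k : Nat) (hk : k ≤ n / 2) :
    (PySem.List.pyRange 1 ((k : Int) + 1) 1).foldl
      (fun (s : List Int × Int) i =>
        let c := PySem.Int.floordiv (s.2 * ((n : Int) - 2 * i + 2) * ((n : Int) - 2 * i + 1))
          (i * ((n : Int) - i + 1))
        (s.1 ++ [c], c)) ([1], 1)
      = ((List.range (k + 1)).map (fun i => ((n - i).choose i : Int)), ((n - k).choose k : Int)) := by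
  induction k with
  | zero =>
    rw [show ((0 : Nat) : Int) + 1 = 1 by norm_num,
        PySem.List.pyRange_one_eq_nil (le_refl 1)]
    simp
  | succ k ih =>
    have hk' : k ≤ n / 2 := by omega
    have hn : 2 * (k + 1) ≤ n := by omega
    rw [show (((k + 1 : Nat)) : Int) + 1 = (((k : Nat) : Int) + 1) + 1 by push_cast; ring,
        PySem.List.pyRange_one_succ_right (by omega : (1 : Int) ≤ (k : Int) + 1),
        List.foldl_append, ih hk']
    simp only [List.foldl_cons, List.foldl_nil]
    have e1 : (n : Int) - 2 * ((k : Int) + 1) + 2 = ((n - 2 * k : Nat) : Int) := by omega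
    have e2 : (n : Int) - 2 * ((k : Int) + 1) + 1 = ((n - 2 * k - 1 : Nat) : Int) := by omega
    have e3 : (n : Int) - ((k : Int) + 1) + 1 = ((n - k : Nat) : Int) := by omega
    have hc : PySem.Int.floordiv
        (((n - k).choose k : Int) * ((n : Int) - 2 * ((k : Int) + 1) + 2) * ((n : Int) - 2 * ((k : Int) + 1) + 1))
        (((k : Int) + 1) * ((n : Int) - ((k : Int) + 1) + 1))
        = ((n - k - 1).choose (k + 1) : Int) := by
      rw [e1, e2, e3, show ((k : Int) + 1) = ((k + 1 : Nat) : Int) by push_cast; ring]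
      have hnum : (((n - k).choose k : Int)) * ((n - 2 * k : Nat) : Int) * ((n - 2 * k - 1 : Nat) : Int)
          = ((n - k - 1).choose (k + 1) : Int) * (((k + 1 : Nat) : Int) * ((n - k : Nat) : Int)) := by
        have := choose_ratio n k hn
        exact_mod_cast congrArg (fun t : Nat => (t : Int)) this
      rw [hnum]
      have hpos : (0 : Int) < ((k + 1 : Nat) : Int) * ((n - k : Nat) : Int) := by
        have : (0 : Nat) < (k + 1) * (n - k) := by
          apply Nat.mul_pos <;> omega
        exact_mod_cast this
      rw [PySem.Int.floordiv_eq_ediv_of_pos hpos, Int.mul_ediv_cancel _ (by omega)]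
    rw [hc]
    have e4 : n - (k + 1) = n - k - 1 := by omega
    simp [List.range_succ, e4]

lemma pvBinomRow_eq (n : Nat) (_h : 1 ≤ n) : pvBinomRow (n : Int) = specRow n := by
  unfold pvBinomRow specRow
  have hfd : PySem.Int.floordiv (n : Int) 2 = ((n / 2 : Nat) : Int) := by
    rw [PySem.Int.floordiv_eq_ediv_of_pos (by norm_num)]; omega
  rw [hfd, binomRow_loop n (n / 2) (le_refl _)]

-- ===== VERDICT (by name: the statement is the Claim_ definition above) =====
theorem path_EJ_spec : Claim_equal_path_EJ := by
  intro m _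
  unfold Spec_path_EJ
  by_cases h1 : m = 1
  · subst h1
    unfold path_EJ path_EJ_alt
    norm_num
  · by_cases h2 : m ≤ 1
    · -- m ≤ 0 : range(m-1) is empty in A, and B returns the same base pair
      have ht : (m - 1).toNat = 0 := by omega
      unfold path_EJ path_EJ_alt
      rw [if_neg h1, if_pos h2, ht]
      rfl
    · -- m ≥ 2
      obtain ⟨N, hN⟩ : ∃ N : Nat, m = (N : Int) := ⟨m.toNat, by omega⟩
      subst hN
      have hN2 : 2 ≤ N := by omega
      unfold path_EJ path_EJ_alt
      rw [if_neg h1, if_neg h2]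
      have ht : ((N : Int) - 1).toNat = N - 1 := by omega
      rw [ht, loopA]
      have e1 : N - 1 + 1 = N := by omega
      rw [e1]
      have hb1 : pvBinomRow (N : Int) = specRow N := pvBinomRow_eq N (by omega)
      have hb2 : pvBinomRow ((N : Int) - 1) = specRow (N - 1) := by
        rw [show (N : Int) - 1 = ((N - 1 : Nat) : Int) by omega]
        exact pvBinomRow_eq (N - 1) (by omega)
      rw [hb1, hb2]
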